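-- pv_equiv track=rewrite | github.com/surajrdy/6.101 | w6/lab.py | combine_recipes
-- ===== SOURCE A (Python) =====
-- def add_recipes(recipe_dicts):
--     """
--     Given a list of recipe dictionaries that map food items to quantities,
--     return a new dictionary that maps each ingredient name
--     to the sum of its quantities across the given recipe dictionaries.
--
--     For example,
--         add_recipes([{'milk':1, 'chocolate':1}, {'sugar':1, 'milk':2}])
--     should return:
--         {'milk':3, 'chocolate': 1, 'sugar': 1}
--     """
--     # Intialized combined dictionary
--     combined = {}
--     # Going through the recipes
--     for recipe in recipe_dicts:
--         for ingr, quant in recipe.items():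
--             # If the ingredient wasn't present, then initialize it
--             if ingr not in combined:
--                 combined[ingr] = 0
--             # Adding the quantity
--             combined[ingr] += quant
--     return combined
--
-- def combine_recipes(nested_recipes):
--     """
--     Given a list of lists of recipe dictionaries, where each inner list
--     represents all the recipes for a certain ingredient, compute and return a
--     list of recipe dictionaries that represent all the possible combinations of
--     ingredient recipes.
--     """
--     # If there are no recipes, then return an empty list
--     if not nested_recipes:
--         return []
--     # Initialize the combine list
--     combine = [{}]
--     for recipes in nested_recipes:
--         # The new combinations for test cases
--         new_comb = []
--         # Going through the recipes
--         for recipe in recipes: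
--             for comb in combine:
--                 # Adding the new combinations
--                 new_comb.append(add_recipes([comb, recipe]))
--         # Updating the combine list
--         combine = new_comb
--     return combine
-- ===== SOURCE B (Python) =====
-- def combine_recipes(nested_recipes):
--     """
--     Given a list of lists of recipe dictionaries, compute all combinations.
--     Recursive product-then-merge: one merged dict per combination, built
--     directly instead of growing partial combinations level by level.
--     """
--     if not nested_recipes:
--         return []
--     return _product_merge(nested_recipes)
--
--
-- def _product_merge(lists):
--     # Cartesian product of the recipe lists, with the first list varying
--     # fastest (so the last list varies slowest), each tuple merged into one
--     # dict by summing quantities.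
--     if not lists:
--         return [{}]
--     head = lists[0]
--     return [_merge(recipe, tail)
--             for tail in _product_merge(lists[1:])
--             for recipe in head]
--
--
-- def _merge(recipe, tail):
--     merged = dict(recipe)
--     for ingr, quant in tail.items():
--         merged[ingr] = merged.get(ingr, 0) + quant
--     return merged
-- ===== Notes on version B (the rewrite author's own statement) =====
-- stated objective: alternative
-- what changed: Replaces A's iterative level-by-level growth of partial combinations (each step re-merging every partial dict from scratch via add_recipes([comb, recipe])) with a recursive Cartesian-product pass that merges each tuple of recipes directly into one dict.
import Mathlib
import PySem

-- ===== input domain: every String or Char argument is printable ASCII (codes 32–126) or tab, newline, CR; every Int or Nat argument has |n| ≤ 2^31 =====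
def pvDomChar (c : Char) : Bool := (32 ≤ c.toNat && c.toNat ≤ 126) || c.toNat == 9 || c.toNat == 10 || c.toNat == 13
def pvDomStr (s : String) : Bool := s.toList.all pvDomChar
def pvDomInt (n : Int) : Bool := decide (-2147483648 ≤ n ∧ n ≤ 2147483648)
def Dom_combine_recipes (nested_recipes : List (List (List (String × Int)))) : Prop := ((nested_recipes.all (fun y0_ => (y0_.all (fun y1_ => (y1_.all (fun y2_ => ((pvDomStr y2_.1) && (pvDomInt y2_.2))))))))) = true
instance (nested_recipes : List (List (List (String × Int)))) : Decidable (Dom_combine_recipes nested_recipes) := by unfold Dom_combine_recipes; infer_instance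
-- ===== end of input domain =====

-- B replaces A's level-by-level growth of partial combinations with a recursive
-- product-then-merge pass (same results, same order); alternative decomposition, no speed claim.

-- ===== PORT A =====
-- each Python dict travels as its items list; PySem.Dict.ofList rebuilds the dict
-- value (the identity on duplicate-free encodings, i.e. on every actual Python dict)
def add_recipes (recipe_dicts : List (PySem.Dict String Int)) : PySem.Dict String Int :=
  recipe_dicts.foldl
    (fun combined recipe =>
      recipe.items.foldl
        (fun combined p =>
          let combined := if combined.contains p.1 then combined else combined.insert p.1 (0 : Int)
          combined.modify p.1 0 (· + p.2))
        combined)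
    PySem.Dict.empty

-- the body of A's 'for recipes in nested_recipes' loop, as a named helper
def pvStepA (combine : List (PySem.Dict String Int)) (recipes : List (List (String × Int))) :
    List (PySem.Dict String Int) :=
  recipes.foldl
    (fun new_comb recipe =>
      combine.foldl
        (fun new_comb comb => new_comb ++ [add_recipes [comb, PySem.Dict.ofList recipe]])
        new_comb)
    []

def combine_recipes (nested_recipes : List (List (List (String × Int)))) : List (List (String × Int)) :=
  if nested_recipes = [] then []
  else (nested_recipes.foldl pvStepA [PySem.Dict.empty]).map PySem.Dict.items

-- ===== PORT B =====
def pvMerge (recipe tail : PySem.Dict String Int) : PySem.Dict String Int :=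
  tail.items.foldl (fun merged p => merged.insert p.1 (merged.getD p.1 0 + p.2)) recipe

def pvProductMerge : List (List (List (String × Int))) → List (PySem.Dict String Int)
  | [] => [PySem.Dict.empty]
  | head :: rest =>
      (pvProductMerge rest).flatMap
        (fun tail => head.map (fun recipe => pvMerge (PySem.Dict.ofList recipe) tail))

def combine_recipes_alt (nested_recipes : List (List (List (String × Int)))) : List (List (String × Int)) :=
  if nested_recipes = [] then []
  else (pvProductMerge nested_recipes).map PySem.Dict.items

-- ===== PRECONDITION & SPEC =====
def Spec_combine_recipes (nested_recipes : List (List (List (String × Int)))) (out : List (List (String × Int))) : Prop := out = combine_recipes_alt nested_recipes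
instance (nested_recipes : List (List (List (String × Int)))) (out : List (List (String × Int))) : Decidable (Spec_combine_recipes nested_recipes out) := by unfold Spec_combine_recipes; infer_instance

-- ===== CLAIM (what is proved, stated in full; the proofs are below) =====
def Claim_equal_combine_recipes : Prop := ∀ (nested_recipes : List (List (List (String × Int)))), Dom_combine_recipes nested_recipes → Spec_combine_recipes nested_recipes (combine_recipes nested_recipes)

-- ===== LEMMAS AND PROOFS =====

-- one merge step: d[k] = d.get(k, 0) + v
def pvAdd (d : PySem.Dict String Int) (p : String × Int) : PySem.Dict String Int :=
  d.insert p.1 (d.getD p.1 0 + p.2)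

-- merging a list of (ingredient, quantity) pairs into a dict
def pvMergeL (d : PySem.Dict String Int) (l : List (String × Int)) : PySem.Dict String Int :=
  l.foldl pvAdd d

lemma pvMerge_eq (r t : PySem.Dict String Int) : pvMerge r t = pvMergeL r t.items := rfl

-- A's inner-loop body (setdefault-then-add) is exactly pvAdd
lemma pvAddA_eq (d : PySem.Dict String Int) (p : String × Int) :
    (let c := if d.contains p.1 then d else d.insert p.1 (0 : Int)
     c.modify p.1 0 (· + p.2)) = pvAdd d p := by
  by_cases h : d.contains p.1 = true
  · simp [h, PySem.Dict.modify, pvAdd]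
  · have h' : d.contains p.1 = false := by simpa using h
    simp [h', PySem.Dict.modify, pvAdd, PySem.Dict.getD_insert_self,
      PySem.Dict.insert_insert_self, PySem.Dict.getD_of_not_contains d 0 h']

lemma foldl_eq_pvMergeL (d : PySem.Dict String Int) (l : List (String × Int)) :
    l.foldl
      (fun combined p =>
        let combined := if combined.contains p.1 then combined else combined.insert p.1 (0 : Int)
        combined.modify p.1 0 (· + p.2)) d = pvMergeL d l := by
  unfold pvMergeL
  congr 1
  funext x p
  exact pvAddA_eq x p

lemma add_recipes_eq (c r : PySem.Dict String Int) :
    add_recipes [c, r] = pvMergeL (pvMergeL PySem.Dict.empty c.items) r.items := by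
  simp only [add_recipes, List.foldl_cons, List.foldl_nil, foldl_eq_pvMergeL]

lemma nodup_pvAdd (d : PySem.Dict String Int) (p : String × Int) (h : d.keys.Nodup) :
    (pvAdd d p).keys.Nodup := by
  simp only [pvAdd]
  exact PySem.Dict.nodup_keys_insert _ _ _ h

lemma nodup_pvMergeL (d : PySem.Dict String Int) (l : List (String × Int)) (h : d.keys.Nodup) :
    (pvMergeL d l).keys.Nodup := by
  simpa [pvMergeL, pvAdd] using
    PySem.Dict.nodup_keys_foldl_insert_key l Prod.fst (fun d p => d.getD p.1 0 + p.2) d h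

-- two inserts at distinct keys commute when the first key is already present
lemma insert_comm_of_contains (d : PySem.Dict String Int) {k k' : String} (a b : Int)
    (hk : d.contains k = true) (hne : k' ≠ k) :
    (d.insert k a).insert k' b = (d.insert k' b).insert k a := by
  apply PySem.Dict.ext
  by_cases hc : d.contains k' = true
  · have h1 : (d.insert k a).contains k' = true := by simp [PySem.Dict.contains_insert, hc]
    have h2 : (d.insert k' b).contains k = true := by simp [PySem.Dict.contains_insert, hk]
    rw [PySem.Dict.items_insert_of_contains _ _ h1, PySem.Dict.items_insert_of_contains _ _ hk,
        PySem.Dict.items_insert_of_contains _ _ h2, PySem.Dict.items_insert_of_contains _ _ hc]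
    simp only [List.map_map]
    apply List.map_congr_left
    intro p _
    by_cases hpk : p.1 = k
    · simp [Function.comp, hpk, Ne.symm hne]
    · by_cases hpk' : p.1 = k'
      · simp [Function.comp, hpk', hne]
      · simp [Function.comp, hpk, hpk']
  · have hc' : d.contains k' = false := by simpa using hc
    have h1 : (d.insert k a).contains k' = false := by
      simp [PySem.Dict.contains_insert, hc', hne]
    have h2 : (d.insert k' b).contains k = true := by simp [PySem.Dict.contains_insert, hk]
    rw [PySem.Dict.items_insert_of_not_contains _ _ h1, PySem.Dict.items_insert_of_contains _ _ hk,
        PySem.Dict.items_insert_of_contains _ _ h2, PySem.Dict.items_insert_of_not_contains _ _ hc']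
    simp [hne]

lemma pvAdd_comm (d : PySem.Dict String Int) (p : String × Int) (k : String) (v : Int)
    (hk : d.contains k = true) (hne : p.1 ≠ k) :
    pvAdd (pvAdd d (k, v)) p = pvAdd (pvAdd d p) (k, v) := by
  simp only [pvAdd]
  rw [PySem.Dict.getD_insert_of_ne _ _ _ hne, PySem.Dict.getD_insert_of_ne _ _ _ (Ne.symm hne)]
  exact insert_comm_of_contains d _ _ hk hne

lemma pvAdd_pvAdd_self (d : PySem.Dict String Int) (k : String) (w v : Int) :
    pvAdd (pvAdd d (k, w)) (k, v) = pvAdd d (k, w + v) := by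
  simp only [pvAdd]
  rw [PySem.Dict.getD_insert_self, PySem.Dict.insert_insert_self, add_assoc]

-- an update at a key already present commutes past a merge over other keys
lemma pvMergeL_pvAdd_comm : ∀ (l : List (String × Int)) (d : PySem.Dict String Int)
    (k : String) (v : Int), d.contains k = true → (∀ p ∈ l, p.1 ≠ k) →
    pvMergeL (pvAdd d (k, v)) l = pvAdd (pvMergeL d l) (k, v) := by
  intro l
  induction l with
  | nil => intro d k v _ _; rfl
  | cons q t ih =>
      intro d k v hk hl
      simp only [pvMergeL, List.foldl_cons] at *
      rw [pvAdd_comm d q k v hk (hl q (by simp))]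
      exact ih (pvAdd d q) k v
        (by simp only [pvAdd]; rw [PySem.Dict.contains_insert]; simp [hk])
        (fun p hp => hl p (by simp [hp]))

-- merging fresh, distinct keys appends the pairs verbatim
lemma pvMergeL_fresh : ∀ (l : List (String × Int)) (d : PySem.Dict String Int),
    (l.map (fun p => p.1)).Nodup → (∀ p ∈ l, d.contains p.1 = false) →
    pvMergeL d l = PySem.Dict.mk (d.items ++ l) := by
  intro l
  induction l with
  | nil => intro d _ _; apply PySem.Dict.ext; simp [pvMergeL]
  | cons p t ih =>
      intro d h1 h2
      have hc : d.contains p.1 = false := h2 p (by simp)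
      have hstep : pvAdd d p = PySem.Dict.mk (d.items ++ [p]) := by
        apply PySem.Dict.ext
        simp only [pvAdd]
        rw [PySem.Dict.getD_of_not_contains d 0 hc, PySem.Dict.items_insert_of_not_contains _ _ hc]
        simp
      have h1' : p.1 ∉ t.map (fun q => q.1) ∧ (t.map (fun q => q.1)).Nodup := by
        rw [List.map_cons] at h1
        exact List.nodup_cons.mp h1
      have hrec := ih (PySem.Dict.mk (d.items ++ [p])) h1'.2
        (by
          intro q hq
          have hne : p.1 ≠ q.1 := by
            intro hEq
            exact h1'.1 (hEq ▸ List.mem_map_of_mem hq)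
          have hdq : d.items.any (fun r => r.1 == q.1) = false := by
            simpa [PySem.Dict.contains] using h2 q (by simp [hq])
          simp only [PySem.Dict.contains, List.any_append, List.any_cons, List.any_nil]
          simp [hdq, hne])
      calc pvMergeL d (p :: t) = pvMergeL (pvAdd d p) t := rfl
        _ = pvMergeL (PySem.Dict.mk (d.items ++ [p])) t := by rw [hstep]
        _ = PySem.Dict.mk ((d.items ++ [p]) ++ t) := hrec
        _ = PySem.Dict.mk (d.items ++ p :: t) := by apply PySem.Dict.ext; simp

lemma pvMergeL_empty_items (d : PySem.Dict String Int) (h : d.keys.Nodup) :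
    pvMergeL PySem.Dict.empty d.items = d := by
  rw [pvMergeL_fresh d.items PySem.Dict.empty (by simpa [PySem.Dict.keys] using h)
      (fun p _ => PySem.Dict.contains_empty p.1)]
  apply PySem.Dict.ext
  simp [PySem.Dict.empty]

-- the key step: merging one more pair on the right commutes with a pending merge
lemma pvMergeL_items_pvAdd (m : PySem.Dict String Int) (hm : m.keys.Nodup)
    (d : PySem.Dict String Int) (k : String) (v : Int) :
    pvMergeL d (pvAdd m (k, v)).items = pvAdd (pvMergeL d m.items) (k, v) := by
  by_cases hc : m.contains k = true
  · obtain ⟨⟨pk, w⟩, hpmem, hpk⟩ :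
        ∃ p ∈ m.items, (p.1 == k) = true := by
      simpa [PySem.Dict.contains, List.any_eq_true] using hc
    have hkeq : pk = k := by simpa using hpk
    subst hkeq
    obtain ⟨l1, l2, hsplit⟩ := List.append_of_mem hpmem
    have hgetD : m.getD pk 0 = w := PySem.Dict.getD_of_mem_items m hpmem hm 0
    have hm' : (l1.map (fun p => p.1)).Nodup ∧ pk ∉ l1.map (fun p => p.1) ∧
        pk ∉ l2.map (fun p => p.1) := by
      have := hm
      simp only [PySem.Dict.keys] at this
      rw [hsplit] at this
      simp only [List.map_append, List.map_cons] at this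
      rcases List.nodup_append.mp this with ⟨ha, hb, hdisj⟩
      refine ⟨ha, fun hmem => hdisj pk hmem pk (by simp) rfl, ?_⟩
      exact (List.nodup_cons.mp hb).1
    have h1 : ∀ p ∈ l1, p.1 ≠ pk := by
      intro p hp hEq
      exact hm'.2.1 (hEq ▸ List.mem_map_of_mem hp)
    have h2 : ∀ p ∈ l2, p.1 ≠ pk := by
      intro p hp hEq
      exact hm'.2.2 (hEq ▸ List.mem_map_of_mem hp)
    have hitems : (pvAdd m (pk, v)).items = l1 ++ (pk, w + v) :: l2 := by
      simp only [pvAdd]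
      rw [PySem.Dict.items_insert_of_contains _ _ hc, hgetD, hsplit]
      simp only [List.map_append, List.map_cons]
      congr 1
      · conv_rhs => rw [← List.map_id l1]
        apply List.map_congr_left
        intro p hp
        simp [h1 p hp]
      · congr 1
        · simp
        · conv_rhs => rw [← List.map_id l2]
          apply List.map_congr_left
          intro p hp
          simp [h2 p hp]
    rw [hitems, hsplit]
    simp only [pvMergeL, List.foldl_append, List.foldl_cons]
    have hy : (pvAdd (List.foldl pvAdd d l1) (pk, w)).contains pk = true := by
      simp only [pvAdd]
      exact PySem.Dict.contains_insert_self _ _ _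
    calc List.foldl pvAdd (pvAdd (List.foldl pvAdd d l1) (pk, w + v)) l2
        = List.foldl pvAdd (pvAdd (pvAdd (List.foldl pvAdd d l1) (pk, w)) (pk, v)) l2 := by
          rw [pvAdd_pvAdd_self]
      _ = pvAdd (List.foldl pvAdd (pvAdd (List.foldl pvAdd d l1) (pk, w)) l2) (pk, v) := by
          simpa [pvMergeL] using
            pvMergeL_pvAdd_comm l2 (pvAdd (List.foldl pvAdd d l1) (pk, w)) pk v hy h2
  · have hc' : m.contains k = false := by simpa using hc
    have hitems : (pvAdd m (k, v)).items = m.items ++ [(k, v)] := by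
      simp only [pvAdd]
      rw [PySem.Dict.getD_of_not_contains m 0 hc', PySem.Dict.items_insert_of_not_contains _ _ hc']
      simp
    rw [hitems]
    simp only [pvMergeL, List.foldl_append, List.foldl_cons, List.foldl_nil]

-- associativity of merging: merge into d a dict built from m by l, or merge m then l
lemma pvMergeL_assoc : ∀ (l : List (String × Int)) (m : PySem.Dict String Int),
    m.keys.Nodup → ∀ (d : PySem.Dict String Int),
    pvMergeL d (pvMergeL m l).items = pvMergeL (pvMergeL d m.items) l := by
  intro l
  induction l with
  | nil => intro m _ d; rfl
  | cons p t ih =>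
      intro m hm d
      obtain ⟨k, v⟩ := p
      calc pvMergeL d (pvMergeL m ((k, v) :: t)).items
          = pvMergeL d (pvMergeL (pvAdd m (k, v)) t).items := rfl
        _ = pvMergeL (pvMergeL d (pvAdd m (k, v)).items) t :=
            ih (pvAdd m (k, v)) (nodup_pvAdd m (k, v) hm) d
        _ = pvMergeL (pvAdd (pvMergeL d m.items) (k, v)) t := by
            rw [pvMergeL_items_pvAdd m hm d k v]
        _ = pvMergeL (pvMergeL d m.items) ((k, v) :: t) := rfl

lemma pvStepA_eq (combine : List (PySem.Dict String Int)) (recipes : List (List (String × Int)))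
    (h : ∀ c ∈ combine, c.keys.Nodup) :
    pvStepA combine recipes =
      recipes.flatMap (fun r => combine.map (fun c => pvMergeL c (PySem.Dict.ofList r).items)) := by
  simp only [pvStepA, PySem.List.foldl_append_singleton_eq_map,
    PySem.List.foldl_append_eq_flatMap, List.nil_append]
  apply List.flatMap_congr
  intro r _
  apply List.map_congr_left
  intro c hc
  rw [add_recipes_eq, pvMergeL_empty_items c (h c hc)]

lemma nodup_pvProductMerge : ∀ (ls : List (List (List (String × Int))))
    (t : PySem.Dict String Int), t ∈ pvProductMerge ls → t.keys.Nodup := by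
  intro ls
  induction ls with
  | nil =>
      intro t ht
      simp only [pvProductMerge, List.mem_singleton] at ht
      rw [ht]
      exact PySem.Dict.nodup_keys_empty
  | cons hd tl ih =>
      intro t ht
      simp only [pvProductMerge, List.mem_flatMap, List.mem_map] at ht
      obtain ⟨tail, _, r, _, rfl⟩ := ht
      rw [pvMerge_eq]
      exact nodup_pvMergeL _ _ (PySem.Dict.nodup_keys_ofList r)

lemma main_fold : ∀ (ls : List (List (List (String × Int))))
    (acc : List (PySem.Dict String Int)), (∀ c ∈ acc, c.keys.Nodup) →
    ls.foldl pvStepA acc =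
      (pvProductMerge ls).flatMap (fun t => acc.map (fun c => pvMergeL c t.items)) := by
  intro ls
  induction ls with
  | nil =>
      intro acc _
      simp [pvProductMerge, pvMergeL, PySem.Dict.empty]
  | cons hd tl ih =>
      intro acc h
      have hnodup' : ∀ c' ∈ pvStepA acc hd, c'.keys.Nodup := by
        intro c' hc'
        rw [pvStepA_eq acc hd h] at hc'
        simp only [List.mem_flatMap, List.mem_map] at hc'
        obtain ⟨r, _, c, hc, rfl⟩ := hc'
        exact nodup_pvMergeL c _ (h c hc)
      rw [List.foldl_cons, ih (pvStepA acc hd) hnodup', pvStepA_eq acc hd h]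
      simp only [pvProductMerge, List.map_flatMap, List.map_map, List.flatMap_assoc,
        List.flatMap_map]
      apply List.flatMap_congr
      intro tail htail
      apply List.flatMap_congr
      intro r _
      apply List.map_congr_left
      intro c _
      simp only [Function.comp]
      rw [pvMerge_eq]
      exact (pvMergeL_assoc tail.items (PySem.Dict.ofList r)
        (PySem.Dict.nodup_keys_ofList r) c).symm

-- ===== VERDICT (by name: the statement is the Claim_ definition above) =====
theorem combine_recipes_spec : Claim_equal_combine_recipes := by
  intro ls _
  show combine_recipes ls = combine_recipes_alt ls
  by_cases hnil : ls = []
  · simp [combine_recipes, combine_recipes_alt, hnil]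
  · unfold combine_recipes combine_recipes_alt
    rw [if_neg hnil, if_neg hnil]
    congr 1
    rw [main_fold ls [PySem.Dict.empty]
      (by intro c hc; simp only [List.mem_singleton] at hc; rw [hc]; exact PySem.Dict.nodup_keys_empty)]
    simp only [List.map_cons, List.map_nil]
    have hpt : ∀ t ∈ pvProductMerge ls, [pvMergeL PySem.Dict.empty t.items] = [t] := by
      intro t ht
      rw [pvMergeL_empty_items t (nodup_pvProductMerge ls t ht)]
    rw [List.flatMap_congr hpt]
    simp
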